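-- pv_equiv track=rewrite | github.com/rbeard0330/AdventOfCode | 2021/d24.py | valid_states_by_round
-- ===== SOURCE A (Python) =====
-- all_rounds = [
--     (13, 6, False),
--     (15, 7, False),
--     (15, 10, False),
-- (11, 2, False),
-- (-7, 15, True),
-- (10, 8, False),
-- (10, 1, False),
-- (-5, 10, True),
-- (15, 5, False),
-- (-3, 3, True),
-- (0, 5, True),
-- (-5, 11, True),
-- (-9, 12, True),
-- (0, 10, True),
-- ]
--
-- INPUT_RANGE = set(range(1, 10))
--
-- ALL_STATES = set(range(26))
--
-- def valid_states_by_round(valid_end_states, rounds=None, states_by_round=None):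
--     rounds = rounds if rounds is not None else all_rounds
--     states_by_round = states_by_round or {14: [[]]}
--
--     *prior_rounds, (input_adjust, output_adjust, discard_top) = rounds
--     matchable_tops = {i - input_adjust for i in INPUT_RANGE}
--     valid_start_states = []
--     for valid_end_state in valid_end_states:
--         if discard_top:
--             # One way to get a valid end state is to have a full valid state, and a matching top, then
--             # pop the prior state and not add anything
--             valid_start_states.append([*valid_end_state, matchable_tops])
--             # Otherwise we need a near-complete valid state with a non-matching top, then we discard the
--             # matching top and push a valid state on top
--             if len(valid_end_state) < 1:
--                 continue
--             inputs_pushing_valid_top = {result - output_adjust for result in valid_end_state[-1]} & INPUT_RANGE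
--             if len(inputs_pushing_valid_top) == 0:
--                 continue
--             valid_start_states.append([*valid_end_state[:-1], (ALL_STATES if len(inputs_pushing_valid_top) > 1
--                                                                else ALL_STATES - inputs_pushing_valid_top)])
--         else:
--             # If we aren't popping, the top must also be a valid input and also be matchable
--             valid_state_with_matching_tops = valid_end_state[-1] & matchable_tops
--             if valid_state_with_matching_tops:
--                 valid_start_states.append([*valid_end_state[:-1], valid_state_with_matching_tops])
--             # Otherwise we need a near-complete valid state with a non-matching top, then we push a valid state on top
--                 # inputs_creating_valid_top = ({i + output_adjust for i in INPUT_RANGE} & valid_end_state[-1])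
--             if len(valid_end_state) < 2:
--                 continue
--             *rest_stack, start_top, end_top = valid_end_state
--             inputs_pushing_valid_top = {result - output_adjust for result in end_top} & INPUT_RANGE
--             if len(inputs_pushing_valid_top) == 0:
--                 continue
--             start_top = start_top if len(inputs_pushing_valid_top) > 1 else start_top - {inputs_pushing_valid_top.pop() - input_adjust}
--             valid_start_states.append([*valid_end_state[:-2], start_top])
--     states_by_round[len(rounds) - 1] = valid_start_states or [[]]
--     if not prior_rounds:
--         return states_by_round
--     else:
--         return valid_states_by_round(valid_start_states, prior_rounds, states_by_round)
-- ===== SOURCE B (Python) =====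
-- # Alternative decomposition: the tail recursion over shrinking `rounds` becomes one reverse
-- # loop over enumerate(rounds), and the per-state append/continue loop becomes a pure
-- # expansion function flat-mapped over the frontier.  Return-value equivalence only: like A,
-- # this mutates a caller-supplied states_by_round dict in place.
-- all_rounds = [
--     (13, 6, False),
--     (15, 7, False),
--     (15, 10, False),
--     (11, 2, False),
--     (-7, 15, True),
--     (10, 8, False),
--     (10, 1, False),
--     (-5, 10, True),
--     (15, 5, False),
--     (-3, 3, True),
--     (0, 5, True),
--     (-5, 11, True),
--     (-9, 12, True),
--     (0, 10, True),
-- ]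
--
-- INPUT_RANGE = set(range(1, 10))
--
-- ALL_STATES = set(range(26))
--
--
-- def _expand(end, input_adjust, output_adjust, discard_top, matchable_tops):
--     if discard_top:
--         out = [[*end, matchable_tops]]
--         if len(end) >= 1:
--             pushing = {r - output_adjust for r in end[-1]} & INPUT_RANGE
--             if pushing:
--                 out.append([*end[:-1], ALL_STATES if len(pushing) > 1 else ALL_STATES - pushing])
--         return out
--     out = []
--     matching = end[-1] & matchable_tops
--     if matching:
--         out.append([*end[:-1], matching])
--     if len(end) >= 2:
--         pushing = {r - output_adjust for r in end[-1]} & INPUT_RANGE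
--         if pushing:
--             top = end[-2] if len(pushing) > 1 else end[-2] - {next(iter(pushing)) - input_adjust}
--             out.append([*end[:-2], top])
--     return out
--
--
-- def valid_states_by_round(valid_end_states, rounds=None, states_by_round=None):
--     rounds = rounds if rounds is not None else all_rounds
--     states_by_round = states_by_round or {14: [[]]}
--     current = valid_end_states
--     for i, (input_adjust, output_adjust, discard_top) in reversed(list(enumerate(rounds))):
--         matchable_tops = {v - input_adjust for v in INPUT_RANGE}
--         nxt = [s for end in current for s in _expand(end, input_adjust, output_adjust, discard_top, matchable_tops)]
--         states_by_round[i] = nxt or [[]]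
--         current = nxt
--     return states_by_round
-- ===== Notes on version B (the rewrite author's own statement) =====
-- stated objective: alternative
-- what changed: A's tail recursion over a shrinking rounds list rebuilt as one reverse loop over enumerate(rounds), and A's per-state append/continue accumulator loop replaced by a pure per-state expansion helper flat-mapped over the current frontier.
import Mathlib
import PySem

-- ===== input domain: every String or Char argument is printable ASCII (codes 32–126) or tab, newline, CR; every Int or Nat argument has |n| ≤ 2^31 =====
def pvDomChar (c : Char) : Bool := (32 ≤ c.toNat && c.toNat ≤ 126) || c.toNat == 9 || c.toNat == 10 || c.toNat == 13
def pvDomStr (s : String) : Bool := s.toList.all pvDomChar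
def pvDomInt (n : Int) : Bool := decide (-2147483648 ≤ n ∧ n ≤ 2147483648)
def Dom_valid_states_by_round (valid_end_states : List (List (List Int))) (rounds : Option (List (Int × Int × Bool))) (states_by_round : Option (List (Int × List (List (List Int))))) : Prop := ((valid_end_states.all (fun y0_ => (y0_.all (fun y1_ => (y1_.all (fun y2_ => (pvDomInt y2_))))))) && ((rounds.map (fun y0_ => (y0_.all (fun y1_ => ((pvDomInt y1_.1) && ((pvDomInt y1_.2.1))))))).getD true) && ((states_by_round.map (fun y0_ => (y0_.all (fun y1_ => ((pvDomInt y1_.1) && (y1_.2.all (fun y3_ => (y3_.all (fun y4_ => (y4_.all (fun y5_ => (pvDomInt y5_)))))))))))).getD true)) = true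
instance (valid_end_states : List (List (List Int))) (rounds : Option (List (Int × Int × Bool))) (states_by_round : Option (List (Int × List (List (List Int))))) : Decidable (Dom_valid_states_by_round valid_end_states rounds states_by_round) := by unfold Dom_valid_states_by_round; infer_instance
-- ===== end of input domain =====

-- B rewrites A's tail recursion over shrinking `rounds` as one reverse loop over
-- enumerate(rounds) with a pure per-state expansion function flat-mapped over the frontier
-- (objective: alternative decomposition).  Return-value equivalence only: both A and B
-- mutate a caller-supplied states_by_round dict in place.

-- ===== PORT A =====
def pvAllRounds : List (Int × Int × Bool) :=
  [(13, 6, false), (15, 7, false), (15, 10, false), (11, 2, false), (-7, 15, true),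
   (10, 8, false), (10, 1, false), (-5, 10, true), (15, 5, false), (-3, 3, true),
   (0, 5, true), (-5, 11, true), (-9, 12, true), (0, 10, true)]

-- INPUT_RANGE = set(range(1, 10))
def pvInputRange : PySem.Set Int := PySem.Set.ofList (PySem.List.pyRange 1 10 1)

-- ALL_STATES = set(range(26))
def pvAllStates : PySem.Set Int := PySem.Set.ofList (PySem.List.pyRange 0 26 1)

-- the body of A's `for valid_end_state in valid_end_states` loop (appends to the accumulator)
def pvAStep (ia oa : Int) (disc : Bool) (tops : PySem.Set Int)
    (acc : List (List (List Int))) (e : List (List Int)) : List (List (List Int)) :=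
  if disc then
    let acc := acc ++ [e ++ [tops]]
    if e.length < 1 then acc
    else
      let pushing := PySem.Set.inter (PySem.Set.ofList ((e.getLastD []).map (fun r => r - oa))) pvInputRange
      if pushing.length = 0 then acc
      else acc ++ [e.dropLast ++ [if pushing.length > 1 then pvAllStates else PySem.Set.diff pvAllStates pushing]]
  else
    match e.getLast? with
    | none => acc  -- Python raises IndexError on `valid_end_state[-1]` here; excluded by Pre_
    | some endTop =>
      let matching := PySem.Set.inter endTop tops
      let acc := if matching ≠ [] then acc ++ [e.dropLast ++ [matching]] else acc
      if e.length < 2 then acc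
      else
        let startTop := e.dropLast.getLastD []
        let pushing := PySem.Set.inter (PySem.Set.ofList (endTop.map (fun r => r - oa))) pvInputRange
        if pushing.length = 0 then acc
        else
          -- set.pop() on the singleton set is its unique element
          let st := if pushing.length > 1 then startTop else PySem.Set.diff startTop [pushing.headD 0 - ia]
          acc ++ [e.dropLast.dropLast ++ [st]]

def pvAGo (valid_end_states : List (List (List Int))) (rounds : List (Int × Int × Bool))
    (d : PySem.Dict Int (List (List (List Int)))) : PySem.Dict Int (List (List (List Int))) :=
  if rounds = [] then d  -- Python raises ValueError unpacking []; excluded by Pre_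
  else
    let prior := rounds.dropLast
    let lst := rounds.getLastD (0, 0, true)
    let tops := PySem.Set.ofList (pvInputRange.map (fun i => i - lst.1))
    let vss := valid_end_states.foldl (pvAStep lst.1 lst.2.1 lst.2.2 tops) []
    let d' := PySem.Dict.insert d ((rounds.length : Int) - 1) (if vss = [] then [[]] else vss)
    if prior = [] then d' else pvAGo vss prior d'
termination_by rounds.length
decreasing_by
  simp only [List.length_dropLast]
  cases rounds with
  | nil => simp_all
  | cons a t => simp

def valid_states_by_round (valid_end_states : List (List (List Int))) (rounds : Option (List (Int × Int × Bool))) (states_by_round : Option (List (Int × List (List (List Int))))) : List (Int × List (List (List Int))) :=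
  let rnds := rounds.getD pvAllRounds
  -- `states_by_round or {14: [[]]}`: None and the empty dict are both falsy
  let d := match states_by_round with
    | some (p :: rest) => p :: rest
    | _ => [((14 : Int), [([] : List (List Int))])]
  (pvAGo valid_end_states rnds (PySem.Dict.ofList d)).items

-- ===== PORT B =====
-- pure expansion of one end state for one round (Source B's _expand)
def pvExpand (ia oa : Int) (disc : Bool) (tops : PySem.Set Int)
    (e : List (List Int)) : List (List (List Int)) :=
  if disc then
    [e ++ [tops]] ++
      (if 1 ≤ e.length then
        let pushing := PySem.Set.inter (PySem.Set.ofList ((e.getLastD []).map (fun r => r - oa))) pvInputRange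
        if pushing ≠ [] then
          [e.dropLast ++ [if pushing.length > 1 then pvAllStates else PySem.Set.diff pvAllStates pushing]]
        else []
      else [])
  else
    match e.getLast? with
    | none => []  -- Python raises IndexError on `end[-1]` here; excluded by Pre_
    | some endTop =>
      let matching := PySem.Set.inter endTop tops
      (if matching ≠ [] then [e.dropLast ++ [matching]] else []) ++
      (if 2 ≤ e.length then
        let pushing := PySem.Set.inter (PySem.Set.ofList (endTop.map (fun r => r - oa))) pvInputRange
        if pushing ≠ [] then
          -- next(iter(pushing)) on the singleton set is its unique element
          [e.dropLast.dropLast ++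
            [if pushing.length > 1 then e.dropLast.getLastD []
             else PySem.Set.diff (e.dropLast.getLastD []) [pushing.headD 0 - ia]]]
        else []
      else [])

-- the `for i, (…) in reversed(list(enumerate(rounds)))` loop, state = (dict, frontier)
def pvBLoop (d : PySem.Dict Int (List (List (List Int)))) (cur : List (List (List Int))) :
    List (Int × (Int × Int × Bool)) → PySem.Dict Int (List (List (List Int)))
  | [] => d
  | (i, (ia, oa, disc)) :: rest =>
      let tops := PySem.Set.ofList (pvInputRange.map (fun v => v - ia))
      let nxt := cur.flatMap (pvExpand ia oa disc tops)
      pvBLoop (PySem.Dict.insert d i (if nxt = [] then [[]] else nxt)) nxt rest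

def valid_states_by_round_alt (valid_end_states : List (List (List Int))) (rounds : Option (List (Int × Int × Bool))) (states_by_round : Option (List (Int × List (List (List Int))))) : List (Int × List (List (List Int))) :=
  let rnds := rounds.getD pvAllRounds
  -- `states_by_round or {14: [[]]}`: None and the empty dict are both falsy
  let d0 := states_by_round.getD []
  let d := if d0 = [] then [((14 : Int), [([] : List (List Int))])] else d0
  (pvBLoop (PySem.Dict.ofList d) valid_end_states (PySem.List.enumerate rnds 0).reverse).items

-- ===== PRECONDITION & SPEC =====
-- Pre_ excludes exactly the inputs where the Python A raises: an effectively empty `rounds`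
-- (ValueError on unpacking) and a last round that does not discard while some end state is
-- empty (IndexError on `valid_end_state[-1]`).
def Pre_valid_states_by_round (valid_end_states : List (List (List Int))) (rounds : Option (List (Int × Int × Bool))) (states_by_round : Option (List (Int × List (List (List Int))))) : Prop :=
  (rounds.getD pvAllRounds) ≠ [] ∧
  (((rounds.getD pvAllRounds).getLastD (0, 0, true)).2.2 = true ∨ ∀ s ∈ valid_end_states, s ≠ [])
instance (valid_end_states : List (List (List Int))) (rounds : Option (List (Int × Int × Bool))) (states_by_round : Option (List (Int × List (List (List Int))))) : Decidable (Pre_valid_states_by_round valid_end_states rounds states_by_round) := by unfold Pre_valid_states_by_round; infer_instance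

def pvWitness_valid_states_by_round : List (List (List Int)) × (Option (List (Int × Int × Bool))) × (Option (List (Int × List (List (List Int))))) :=
  ([[[1, 2]]], none, none)

def Spec_valid_states_by_round (valid_end_states : List (List (List Int))) (rounds : Option (List (Int × Int × Bool))) (states_by_round : Option (List (Int × List (List (List Int))))) (out : List (Int × List (List (List Int)))) : Prop := out = valid_states_by_round_alt valid_end_states rounds states_by_round
instance (valid_end_states : List (List (List Int))) (rounds : Option (List (Int × Int × Bool))) (states_by_round : Option (List (Int × List (List (List Int))))) (out : List (Int × List (List (List Int)))) : Decidable (Spec_valid_states_by_round valid_end_states rounds states_by_round out) := by unfold Spec_valid_states_by_round; infer_instance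

-- ===== CLAIM (what is proved, stated in full; the proofs are below) =====
def Claim_equal_valid_states_by_round : Prop := ∀ (valid_end_states : List (List (List Int))) (rounds : Option (List (Int × Int × Bool))) (states_by_round : Option (List (Int × List (List (List Int))))), Dom_valid_states_by_round valid_end_states rounds states_by_round → Pre_valid_states_by_round valid_end_states rounds states_by_round → Spec_valid_states_by_round valid_end_states rounds states_by_round (valid_states_by_round valid_end_states rounds states_by_round)


-- ===== LEMMAS AND PROOFS =====

-- A's loop body appends exactly B's expansion of the current end state
lemma pvAStep_eq_append (ia oa : Int) (disc : Bool) (tops : PySem.Set Int)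
    (acc : List (List (List Int))) (e : List (List Int)) :
    pvAStep ia oa disc tops acc e = acc ++ pvExpand ia oa disc tops e := by
  unfold pvAStep pvExpand
  cases disc with
  | true =>
    by_cases h1 : e.length < 1
    · have h1' : ¬ (1 ≤ e.length) := by omega
      simp [h1, h1']
    · have h1' : 1 ≤ e.length := by omega
      by_cases h2 : PySem.Set.inter (PySem.Set.ofList ((e.getLastD []).map (fun r => r - oa))) pvInputRange = []
      · rw [List.getLastD_eq_getLast?] at h2
        simp [h1, h1', h2]
      · rw [List.getLastD_eq_getLast?] at h2
        have h2' : (PySem.Set.inter (PySem.Set.ofList ((e.getLast?.getD []).map (fun r => r - oa))) pvInputRange).length ≠ 0 := by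
          simpa [List.length_eq_zero_iff] using h2
        simp [h1, h1', h2, h2']
  | false =>
    cases hg : e.getLast? with
    | none => simp
    | some endTop =>
      simp only []
      by_cases hm : PySem.Set.inter endTop tops ≠ []
      · by_cases h1 : e.length < 2
        · have h1' : ¬ (2 ≤ e.length) := by omega
          simp [hm, h1, h1']
        · have h1' : 2 ≤ e.length := by omega
          by_cases h2 : PySem.Set.inter (PySem.Set.ofList (endTop.map (fun r => r - oa))) pvInputRange = []
          · simp [hm, h1, h1', h2]
          · have h2' : (PySem.Set.inter (PySem.Set.ofList (endTop.map (fun r => r - oa))) pvInputRange).length ≠ 0 := by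
              simpa [List.length_eq_zero_iff] using h2
            simp [hm, h1, h1', h2, h2']
      · by_cases h1 : e.length < 2
        · have h1' : ¬ (2 ≤ e.length) := by omega
          simp [hm, h1, h1']
        · have h1' : 2 ≤ e.length := by omega
          by_cases h2 : PySem.Set.inter (PySem.Set.ofList (endTop.map (fun r => r - oa))) pvInputRange = []
          · simp [hm, h1, h1', h2]
          · have h2' : (PySem.Set.inter (PySem.Set.ofList (endTop.map (fun r => r - oa))) pvInputRange).length ≠ 0 := by
              simpa [List.length_eq_zero_iff] using h2
            simp [hm, h1, h1', h2, h2']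

lemma pvFoldl_eq_flatMap (ia oa : Int) (disc : Bool) (tops : PySem.Set Int)
    (ves : List (List (List Int))) (acc : List (List (List Int))) :
    ves.foldl (pvAStep ia oa disc tops) acc = acc ++ ves.flatMap (pvExpand ia oa disc tops) := by
  induction ves generalizing acc with
  | nil => simp
  | cons e t ih => simp [List.foldl_cons, pvAStep_eq_append, ih, List.append_assoc]

lemma pvAGo_eq_pvBLoop (rounds : List (Int × Int × Bool)) :
    ∀ (ves : List (List (List Int))) (d : PySem.Dict Int (List (List (List Int)))),
      pvAGo ves rounds d = pvBLoop d ves (PySem.List.enumerate rounds 0).reverse := by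
  induction rounds using List.reverseRecOn with
  | nil => intro ves d; simp [pvAGo, pvBLoop, PySem.List.enumerate_nil]
  | append_singleton xs x ih =>
    intro ves d
    obtain ⟨ia, oa, disc⟩ := x
    rw [pvAGo]
    have hne : ¬ (xs ++ [(ia, oa, disc)] = []) := by simp
    rw [if_neg hne]
    rw [PySem.List.enumerate_append]
    simp only [PySem.List.enumerate_cons, PySem.List.enumerate_nil, List.reverse_append,
      List.reverse_cons, List.reverse_nil, List.nil_append, List.cons_append,
      List.dropLast_concat, List.getLastD_concat]
    rw [pvBLoop]
    have hkey : ((xs ++ [(ia, oa, disc)]).length : Int) - 1 = 0 + (xs.length : Int) := by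
      simp
    rw [hkey, pvFoldl_eq_flatMap]
    simp only [List.nil_append]
    by_cases hxs : xs = []
    · subst hxs
      simp [pvBLoop, PySem.List.enumerate_nil]
    · rw [if_neg hxs]
      exact ih _ _

-- ===== VERDICT (by name: the statement is the Claim_ definition above) =====
theorem valid_states_by_round_spec : Claim_equal_valid_states_by_round := by
  intro ves rounds sbr _ _
  unfold Spec_valid_states_by_round valid_states_by_round valid_states_by_round_alt
  -- the two readings of `states_by_round or {14: [[]]}` agree case by case
  cases sbr with
  | none => exact congrArg PySem.Dict.items (pvAGo_eq_pvBLoop _ _ _)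
  | some l => cases l with
    | nil => exact congrArg PySem.Dict.items (pvAGo_eq_pvBLoop _ _ _)
    | cons p rest => exact congrArg PySem.Dict.items (pvAGo_eq_pvBLoop _ _ _)
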